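-- pv_equiv track=rewrite | github.com/EISLAW/EISLAWManagerWebApp | scoring_service/main.py | _collect_search_tokens
-- ===== SOURCE A (Python) =====
-- from typing import Any, Iterable, List, Optional, Tuple
--
-- def _flatten_strings(value: Any) -> Iterable[str]:
--     if isinstance(value, str):
--         yield value
--     elif isinstance(value, list):
--         for item in value:
--             yield from _flatten_strings(item)
--     elif isinstance(value, dict):
--         for item in value.values():
--             yield from _flatten_strings(item)
--
-- def _collect_search_tokens(fields: dict) -> set[str]:
--     tokens = set()
--     for s in _flatten_strings(fields):
--         if not isinstance(s, str):
--             continue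
--         s = s.strip()
--         if not s:
--             continue
--         lower = s.lower()
--         tokens.add(lower)
--         if "@" in s:
--             local = lower.split("@", 1)[0]
--             tokens.add(local)
--             tokens.update(part for part in local.replace(".", " ").split() if part)
--         digits = "".join(ch for ch in s if ch.isdigit())
--         if len(digits) >= 5:
--             tokens.add(digits)
--     return tokens
-- ===== SOURCE B (Python) =====
-- def _tokens_of(s):
--     s = s.strip()
--     if not s:
--         return []
--     low = s.lower()
--     toks = [low]
--     if "@" in s:
--         local = low.split("@", 1)[0]
--         toks.append(local)
--         toks.extend(local.replace(".", " ").split())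
--     digits = "".join(filter(str.isdigit, s))
--     if len(digits) >= 5:
--         toks.append(digits)
--     return toks
--
-- def _collect_search_tokens(fields):
--     tokens = set()
--     queue = [fields]
--     i = 0
--     while i < len(queue):
--         v = queue[i]
--         i += 1
--         if isinstance(v, str):
--             tokens.update(_tokens_of(v))
--         elif isinstance(v, list):
--             queue.extend(v)
--         elif isinstance(v, dict):
--             queue.extend(v.values())
--     return tokens
-- ===== Notes on version B (the rewrite author's own statement) =====
-- stated objective: alternative
-- what changed: The recursive generator flatten plus in-place set mutation inside branches is replaced by an iterative FIFO worklist over the nested structure and a pure per-string helper that returns the token list, merged into the set with one update per string.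
import Mathlib
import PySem

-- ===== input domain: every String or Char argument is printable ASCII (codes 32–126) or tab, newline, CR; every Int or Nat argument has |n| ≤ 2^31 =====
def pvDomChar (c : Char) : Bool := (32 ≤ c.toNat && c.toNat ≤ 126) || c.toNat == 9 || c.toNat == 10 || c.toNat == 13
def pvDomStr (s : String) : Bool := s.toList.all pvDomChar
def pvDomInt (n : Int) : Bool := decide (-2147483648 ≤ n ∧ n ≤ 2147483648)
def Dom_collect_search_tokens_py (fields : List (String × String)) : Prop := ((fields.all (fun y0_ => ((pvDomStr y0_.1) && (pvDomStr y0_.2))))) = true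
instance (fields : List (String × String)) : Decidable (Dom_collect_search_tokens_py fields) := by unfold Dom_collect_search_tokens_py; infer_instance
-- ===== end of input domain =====

-- B changes the decomposition (worklist flattening + pure per-string token lists merged with one update each)
-- instead of A's recursive generator with in-place set adds; same cost, return value identical.
-- On the typed domain (a dict mapping strings to strings) A's recursive generator `_flatten_strings`
-- yields exactly the dict's values in insertion order, and B's FIFO worklist visits them in the same order.

-- ===== PORT A =====
-- one step of A's `for s in _flatten_strings(fields)` loop body (s is always a str here)
def tokStepA (tokens : PySem.Set String) (s0 : String) : PySem.Set String :=
  let s := PySem.Str.strip s0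
  if s = "" then tokens
  else
    let lower := PySem.Str.lower s
    let tokens := PySem.Set.add tokens lower
    let tokens :=
      if PySem.Str.isIn "@" s then
        -- lower.split("@", 1)[0]: maxsplit only changes later elements, element [0] is exact;
        -- the list is non-empty and "@" is non-empty, so getD/headD defaults are never taken
        let loc := ((PySem.Str.split? lower "@").getD []).headD ""
        let tokens := PySem.Set.add tokens loc
        PySem.Set.update tokens
          ((PySem.Str.split₀ (PySem.Str.replace loc "." " ")).filter (fun part => part != ""))
      else tokens
    let digits := String.ofList (s.toList.filter (fun ch => PySem.Chars.isdigit ch))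
    if 5 ≤ PySem.Str.len digits then PySem.Set.add tokens digits else tokens

def collect_search_tokens_py (fields : List (String × String)) : List String :=
  (fields.map (·.2)).foldl tokStepA PySem.Set.empty

-- ===== PORT B =====
-- pure per-string token list (_tokens_of in Source B)
def tokensOf (s0 : String) : List String :=
  let s := PySem.Str.strip s0
  if s = "" then []
  else
    let low := PySem.Str.lower s
    let toks := [low]
    let toks :=
      if PySem.Str.isIn "@" s then
        let loc := ((PySem.Str.split? low "@").getD []).headD ""
        toks ++ [loc] ++ PySem.Str.split₀ (PySem.Str.replace loc "." " ")
      else toks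
    let digits := String.ofList (s.toList.filter (fun ch => PySem.Chars.isdigit ch))
    if 5 ≤ PySem.Str.len digits then toks ++ [digits] else toks

-- Source B's index-cursor FIFO worklist; on the typed domain the queue holds only strings after the initial
-- dict is expanded into its values, so the loop is this recursion over the part of the queue after the cursor
def bfsLoop (tokens : PySem.Set String) : List String → PySem.Set String
  | [] => tokens
  | v :: queue => bfsLoop (PySem.Set.update tokens (tokensOf v)) queue

def collect_search_tokens_py_alt (fields : List (String × String)) : List String :=
  bfsLoop PySem.Set.empty (fields.map (·.2))

-- ===== PRECONDITION & SPEC =====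
-- Pre_ excludes association lists with duplicate keys: those do not represent a Python dict
-- (the actual argument type of A), so neither program is ever given one.
def Pre_collect_search_tokens_py (fields : List (String × String)) : Prop :=
  (fields.map (·.1)).Nodup
instance (fields : List (String × String)) : Decidable (Pre_collect_search_tokens_py fields) := by
  unfold Pre_collect_search_tokens_py; infer_instance

def pvWitness_collect_search_tokens_py : (List (String × String)) :=
  [("email", " John.Doe@Example.com "), ("phone", "12345")]

def Spec_collect_search_tokens_py (fields : List (String × String)) (out : List String) : Prop := out = collect_search_tokens_py_alt fields
instance (fields : List (String × String)) (out : List String) : Decidable (Spec_collect_search_tokens_py fields out) := by unfold Spec_collect_search_tokens_py; infer_instance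

-- ===== CLAIM (what is proved, stated in full; the proofs are below) =====
def Claim_equal_collect_search_tokens_py : Prop := ∀ (fields : List (String × String)), Dom_collect_search_tokens_py fields → Pre_collect_search_tokens_py fields → Spec_collect_search_tokens_py fields (collect_search_tokens_py fields)

-- ===== LEMMAS AND PROOFS =====

-- every chunk produced by split₀.go is non-empty (chunks are reversed runs of non-space chars)
theorem split₀_go_ne_nil (s cur : List Char) (acc : List (List Char))
    (hacc : ∀ p ∈ acc, p ≠ []) : ∀ p ∈ PySem.Chars.split₀.go s cur acc, p ≠ [] := by
  induction s generalizing cur acc with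
  | nil =>
      intro p hp
      unfold PySem.Chars.split₀.go at hp
      by_cases hc : cur.isEmpty
      · rw [if_pos hc] at hp
        exact hacc p (List.mem_reverse.mp hp)
      · rw [if_neg hc] at hp
        rcases List.mem_cons.mp (List.mem_reverse.mp hp) with h1 | h1
        · subst h1
          intro hnil
          rw [List.reverse_eq_nil_iff] at hnil
          simp [hnil] at hc
        · exact hacc p h1
  | cons c rest ih =>
      intro p hp
      unfold PySem.Chars.split₀.go at hp
      by_cases hs : PySem.Chars.isspace c
      · rw [if_pos hs] at hp
        by_cases hc : cur.isEmpty
        · rw [if_pos hc] at hp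
          exact ih [] acc hacc p hp
        · rw [if_neg hc] at hp
          refine ih [] (cur.reverse :: acc) ?_ p hp
          intro q hq
          rcases List.mem_cons.mp hq with h1 | h1
          · subst h1
            intro hnil
            rw [List.reverse_eq_nil_iff] at hnil
            simp [hnil] at hc
          · exact hacc q h1
      · rw [if_neg hs] at hp
        exact ih (c :: cur) acc hacc p hp

theorem mem_split₀_ne_empty (x : String) : ∀ p ∈ PySem.Str.split₀ x, p ≠ "" := by
  intro p hp
  simp only [PySem.Str.split₀, List.mem_map] at hp
  obtain ⟨cs, hcs, rfl⟩ := hp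
  have hne := split₀_go_ne_nil x.toList [] [] (by simp) cs hcs
  intro h
  apply hne
  have := congrArg String.toList h
  simpa [String.toList_ofList] using this

theorem filter_split₀ (x : String) :
    (PySem.Str.split₀ x).filter (fun part => part != "") = PySem.Str.split₀ x := by
  apply List.filter_eq_self.mpr
  intro p hp
  simpa using mem_split₀_ne_empty x p hp

-- A's loop body equals "merge the pure token list of s"
theorem step_eq (t : PySem.Set String) (s : String) :
    tokStepA t s = PySem.Set.update t (tokensOf s) := by
  unfold tokStepA tokensOf
  by_cases h : PySem.Str.strip s = ""
  · simp [h, PySem.Set.update_nil]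
  · simp only [h, if_false]
    split_ifs <;>
      simp [filter_split₀, PySem.Set.update_append, PySem.Set.update_cons, PySem.Set.update_nil]

theorem bfsLoop_eq_foldl (l : List String) (t : PySem.Set String) :
    bfsLoop t l = l.foldl tokStepA t := by
  induction l generalizing t with
  | nil => rfl
  | cons v rest ih => simp [bfsLoop, ih, step_eq]

-- ===== VERDICT (by name: the statement is the Claim_ definition above) =====
theorem collect_search_tokens_py_spec : Claim_equal_collect_search_tokens_py := by
  intro fields _ _
  unfold Spec_collect_search_tokens_py collect_search_tokens_py collect_search_tokens_py_alt
  rw [bfsLoop_eq_foldl]
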